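-- pv_equiv track=rewrite | github.com/Shubhojeet-Ghosh/elysium-agents | services/elysium_atlas_services/agent_chat_services.py | format_knowledge_base_string
-- ===== SOURCE A (Python) =====
-- def format_knowledge_base_string(final_results: list) -> str:
--     """
--     Format the final_results list into a knowledge base string for LLM consumption.
--
--     Args:
--         final_results (list): List of knowledge source objects with metadata and content
--
--     Returns:
--         str: Formatted knowledge base string
--     """
--     knowledge_sections = []
--
--     for result in final_results:
--         # Build metadata line with only non-falsy values
--         metadata_parts = []
--
--         # Add knowledge_source only if page_type exists and knowledge_source is present
--         knowledge_source = result.get("knowledge_source", "")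
--         if result.get("page_type") and knowledge_source:
--             metadata_parts.append(f"[knowledge_source: {knowledge_source}]")
--
--         # Add optional fields only if they have non-falsy values
--         if result.get("summary"):
--             metadata_parts.append(f'summary: "{result["summary"]}"')
--
--         if result.get("product_name"):
--             metadata_parts.append(f'product_name: "{result["product_name"]}"')
--
--         if result.get("product_id"):
--             metadata_parts.append(f'product_id: "{result["product_id"]}"')
--
--         if result.get("category"):
--             metadata_parts.append(f'category: "{result["category"]}"')
--
--         if result.get("price") is not None:  # Check explicitly for None since 0 could be valid
--             metadata_parts.append(f'price: {result["price"]}')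
--
--         if result.get("currency"):
--             metadata_parts.append(f'currency: "{result["currency"]}"')
--
--         if result.get("is_available") is not None:  # Check explicitly for None
--             metadata_parts.append(f'is_available: {result["is_available"]}')
--
--         # Join metadata parts with space
--         metadata_line = " ".join(metadata_parts)
--
--         # Add text_content if available
--         text_content = result.get("text_content", "")
--         if text_content:
--             section = f"{metadata_line}\n\n{text_content}"
--         else:
--             section = metadata_line
--
--         knowledge_sections.append(section)
--
--     # Join all sections with separator
--     return "\n\n###\n\n".join(knowledge_sections)
-- ===== SOURCE B (Python) =====
-- # B: recursive decomposition with direct string building -- no intermediate part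
-- # lists and no str.join: each optional field renders to "" or a " "-prefixed
-- # fragment, the fragments are concatenated and the leading space stripped, and
-- # the sections are combined by structural recursion on the list.
--
-- def _q(r, k):
--     v = r.get(k)
--     return f' {k}: "{v}"' if v else ""
--
--
-- def _u(r, k):
--     v = r.get(k)
--     return "" if v is None else f" {k}: {v}"
--
--
-- def _section(r):
--     ks = r.get("knowledge_source", "")
--     head = f" [knowledge_source: {ks}]" if r.get("page_type") and ks else ""
--     cat = (head + _q(r, "summary") + _q(r, "product_name") + _q(r, "product_id")
--            + _q(r, "category") + _u(r, "price") + _q(r, "currency")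
--            + _u(r, "is_available"))
--     line = cat[1:]
--     tc = r.get("text_content")
--     return f"{line}\n\n{tc}" if tc else line
--
--
-- def format_knowledge_base_string(final_results: list) -> str:
--     if not final_results:
--         return ""
--     sec = _section(final_results[0])
--     rest = final_results[1:]
--     return sec if not rest else sec + "\n\n###\n\n" + format_knowledge_base_string(rest)
-- ===== Notes on version B (the rewrite author's own statement) =====
-- stated objective: alternative
-- what changed: B drops A's metadata-parts list, str.join and accumulator loop entirely: each optional field renders directly to '' or a space-prefixed string fragment, the fragments are concatenated and the leading space sliced off, and the sections are combined by structural recursion on the result list instead of appending to a list and joining.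
import Mathlib
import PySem

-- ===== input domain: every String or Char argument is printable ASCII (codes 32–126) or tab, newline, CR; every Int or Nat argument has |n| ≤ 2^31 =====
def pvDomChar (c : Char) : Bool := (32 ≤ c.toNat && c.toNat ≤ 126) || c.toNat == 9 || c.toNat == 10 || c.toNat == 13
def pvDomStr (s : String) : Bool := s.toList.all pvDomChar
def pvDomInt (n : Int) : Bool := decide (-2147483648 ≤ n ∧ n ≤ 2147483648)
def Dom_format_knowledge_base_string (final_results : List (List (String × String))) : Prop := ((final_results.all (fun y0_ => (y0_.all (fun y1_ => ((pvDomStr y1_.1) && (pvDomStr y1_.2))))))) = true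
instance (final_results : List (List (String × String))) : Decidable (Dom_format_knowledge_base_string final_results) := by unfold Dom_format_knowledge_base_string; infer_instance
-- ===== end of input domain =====

-- B drops A's part lists and str.join entirely: fields render to ""-or-space-prefixed
-- fragments concatenated directly (leading space stripped), sections combined by
-- structural recursion. (objective: alternative)

-- ===== PORT A =====
def format_knowledge_base_string (final_results : List (List (String × String))) : String :=
  let knowledge_sections := final_results.foldl (fun acc result =>
    let d := PySem.Dict.mk result
    let metadata_parts : List String := []
    let knowledge_source := PySem.Dict.getD d "knowledge_source" ""
    let metadata_parts := if PySem.Dict.getD d "page_type" "" ≠ "" ∧ knowledge_source ≠ "" then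
        metadata_parts ++ ["[knowledge_source: " ++ knowledge_source ++ "]"] else metadata_parts
    let metadata_parts := if PySem.Dict.getD d "summary" "" ≠ "" then
        metadata_parts ++ ["summary: \"" ++ PySem.Dict.getD d "summary" "" ++ "\""] else metadata_parts
    let metadata_parts := if PySem.Dict.getD d "product_name" "" ≠ "" then
        metadata_parts ++ ["product_name: \"" ++ PySem.Dict.getD d "product_name" "" ++ "\""] else metadata_parts
    let metadata_parts := if PySem.Dict.getD d "product_id" "" ≠ "" then
        metadata_parts ++ ["product_id: \"" ++ PySem.Dict.getD d "product_id" "" ++ "\""] else metadata_parts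
    let metadata_parts := if PySem.Dict.getD d "category" "" ≠ "" then
        metadata_parts ++ ["category: \"" ++ PySem.Dict.getD d "category" "" ++ "\""] else metadata_parts
    let metadata_parts := if (PySem.Dict.get? d "price").isSome then
        metadata_parts ++ ["price: " ++ PySem.Dict.getD d "price" ""] else metadata_parts
    let metadata_parts := if PySem.Dict.getD d "currency" "" ≠ "" then
        metadata_parts ++ ["currency: \"" ++ PySem.Dict.getD d "currency" "" ++ "\""] else metadata_parts
    let metadata_parts := if (PySem.Dict.get? d "is_available").isSome then
        metadata_parts ++ ["is_available: " ++ PySem.Dict.getD d "is_available" ""] else metadata_parts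
    let metadata_line := PySem.Str.join " " metadata_parts
    let text_content := PySem.Dict.getD d "text_content" ""
    let section_ := if text_content ≠ "" then metadata_line ++ "\n\n" ++ text_content else metadata_line
    acc ++ [section_]) []
  PySem.Str.join "\n\n###\n\n" knowledge_sections

-- ===== PORT B =====
-- quoted field: included when the value is present and non-empty ('if v:')
def pvQ (d : PySem.Dict String String) (k : String) : String :=
  let v := PySem.Dict.getD d k ""
  if v ≠ "" then " " ++ k ++ ": \"" ++ v ++ "\"" else ""

-- unquoted field: included whenever the key is present ('is not None')
def pvU (d : PySem.Dict String String) (k : String) : String :=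
  match PySem.Dict.get? d k with
  | none => ""
  | some v => " " ++ k ++ ": " ++ v

def pvSectionB (r : List (String × String)) : String :=
  let d := PySem.Dict.mk r
  let ks := PySem.Dict.getD d "knowledge_source" ""
  let head := if PySem.Dict.getD d "page_type" "" ≠ "" ∧ ks ≠ "" then
      " [knowledge_source: " ++ ks ++ "]" else ""
  let cat := head ++ pvQ d "summary" ++ pvQ d "product_name" ++ pvQ d "product_id"
      ++ pvQ d "category" ++ pvU d "price" ++ pvQ d "currency" ++ pvU d "is_available"
  let line := PySem.Str.slice cat (some 1) none
  let tc := PySem.Dict.getD d "text_content" ""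
  if tc ≠ "" then line ++ "\n\n" ++ tc else line

def format_knowledge_base_string_alt : List (List (String × String)) → String
  | [] => ""
  | r :: rest =>
    let sec := pvSectionB r
    if rest = [] then sec else sec ++ "\n\n###\n\n" ++ format_knowledge_base_string_alt rest

-- ===== PRECONDITION & SPEC =====
def Spec_format_knowledge_base_string (final_results : List (List (String × String))) (out : String) : Prop := out = format_knowledge_base_string_alt final_results
instance (final_results : List (List (String × String))) (out : String) : Decidable (Spec_format_knowledge_base_string final_results out) := by unfold Spec_format_knowledge_base_string; infer_instance

-- ===== CLAIM =====
def Claim_equal_format_knowledge_base_string : Prop := ∀ (final_results : List (List (String × String))), Dom_format_knowledge_base_string final_results → Spec_format_knowledge_base_string final_results (format_knowledge_base_string final_results)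

-- ===== LEMMAS AND PROOFS =====

-- each part rendered with a leading space, concatenated
def pvSpaced (l : List String) : String := l.foldr (fun p acc => " " ++ p ++ acc) ""

theorem pv_spaced_append (l₁ l₂ : List String) :
    pvSpaced (l₁ ++ l₂) = pvSpaced l₁ ++ pvSpaced l₂ := by
  induction l₁ with
  | nil => simp [pvSpaced]
  | cons p l ih => simp [pvSpaced, List.foldr_cons] at ih ⊢; rw [ih]; simp [String.append_assoc]

theorem pv_spaced_toList_cons (p : String) (l : List String) :
    (pvSpaced (p :: l)).toList = ' ' :: PySem.Chars.join [' '] ((p :: l).map String.toList) := by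
  induction l generalizing p with
  | nil => simp [pvSpaced, PySem.Chars.join_singleton]
  | cons q l ih =>
      have : (pvSpaced (p :: q :: l)).toList = ' ' :: (p.toList ++ (pvSpaced (q :: l)).toList) := by
        simp [pvSpaced, List.foldr_cons]
      rw [this, ih q]
      simp only [List.map_cons]
      rw [PySem.Chars.join_cons_cons]
      simp

theorem pv_slice1_spaced (l : List String) :
    PySem.Str.slice (pvSpaced l) (some 1) none = PySem.Str.join " " l := by
  rw [← String.toList_inj, PySem.Str.toList_slice, PySem.Chars.slice_eq_listSlice,
      PySem.List.slice_from_one, PySem.Str.toList_join]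
  cases l with
  | nil => simp [pvSpaced, PySem.Chars.join_nil]
  | cons p l => rw [pv_spaced_toList_cons]; rfl

theorem pv_if_append {α : Type} (c : Prop) [Decidable c] (p : List α) (x : α) :
    (if c then p ++ [x] else p) = p ++ (if c then [x] else []) := by
  split <;> simp

theorem pv_spaced_if (c : Prop) [Decidable c] (x : String) :
    pvSpaced (if c then [x] else []) = if c then " " ++ x else "" := by
  split <;> simp [pvSpaced]

theorem pvQ_eq (d : PySem.Dict String String) (k pre : String) (hpre : k ++ ": \"" = pre) :
    pvQ d k = pvSpaced (if PySem.Dict.getD d k "" ≠ "" then [pre ++ PySem.Dict.getD d k "" ++ "\""] else []) := by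
  rw [pvQ, pv_spaced_if, ← hpre]
  split <;> simp [String.append_assoc]

theorem pvU_eq (d : PySem.Dict String String) (k pre : String) (hpre : k ++ ": " = pre) :
    pvU d k = pvSpaced (if (PySem.Dict.get? d k).isSome then [pre ++ PySem.Dict.getD d k ""] else []) := by
  rw [pvU, pv_spaced_if, ← hpre]
  cases h : PySem.Dict.get? d k with
  | none => simp
  | some v => simp [PySem.Dict.getD_eq_get?_getD, h, String.append_assoc]

theorem pv_foldl_append_map {α β : Type} (g : α → β) (l : List α) (acc : List β) :
    l.foldl (fun acc r => acc ++ [g r]) acc = acc ++ l.map g := by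
  induction l generalizing acc with
  | nil => simp
  | cons x xs ih => simp [List.foldl_cons, ih]

def pvSectionA (result : List (String × String)) : String :=
    let d := PySem.Dict.mk result
    let metadata_parts : List String := []
    let knowledge_source := PySem.Dict.getD d "knowledge_source" ""
    let metadata_parts := if PySem.Dict.getD d "page_type" "" ≠ "" ∧ knowledge_source ≠ "" then
        metadata_parts ++ ["[knowledge_source: " ++ knowledge_source ++ "]"] else metadata_parts
    let metadata_parts := if PySem.Dict.getD d "summary" "" ≠ "" then
        metadata_parts ++ ["summary: \"" ++ PySem.Dict.getD d "summary" "" ++ "\""] else metadata_parts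
    let metadata_parts := if PySem.Dict.getD d "product_name" "" ≠ "" then
        metadata_parts ++ ["product_name: \"" ++ PySem.Dict.getD d "product_name" "" ++ "\""] else metadata_parts
    let metadata_parts := if PySem.Dict.getD d "product_id" "" ≠ "" then
        metadata_parts ++ ["product_id: \"" ++ PySem.Dict.getD d "product_id" "" ++ "\""] else metadata_parts
    let metadata_parts := if PySem.Dict.getD d "category" "" ≠ "" then
        metadata_parts ++ ["category: \"" ++ PySem.Dict.getD d "category" "" ++ "\""] else metadata_parts
    let metadata_parts := if (PySem.Dict.get? d "price").isSome then
        metadata_parts ++ ["price: " ++ PySem.Dict.getD d "price" ""] else metadata_parts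
    let metadata_parts := if PySem.Dict.getD d "currency" "" ≠ "" then
        metadata_parts ++ ["currency: \"" ++ PySem.Dict.getD d "currency" "" ++ "\""] else metadata_parts
    let metadata_parts := if (PySem.Dict.get? d "is_available").isSome then
        metadata_parts ++ ["is_available: " ++ PySem.Dict.getD d "is_available" ""] else metadata_parts
    let metadata_line := PySem.Str.join " " metadata_parts
    let text_content := PySem.Dict.getD d "text_content" ""
    if text_content ≠ "" then metadata_line ++ "\n\n" ++ text_content else metadata_line

theorem pv_section_eq (result : List (String × String)) :
    pvSectionA result = pvSectionB result := by
  unfold pvSectionA pvSectionB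
  set d := PySem.Dict.mk result with hd
  simp only [pv_if_append, List.nil_append]
  rw [pvQ_eq d "summary" "summary: \"" rfl, pvQ_eq d "product_name" "product_name: \"" rfl,
      pvQ_eq d "product_id" "product_id: \"" rfl, pvQ_eq d "category" "category: \"" rfl,
      pvU_eq d "price" "price: " rfl, pvQ_eq d "currency" "currency: \"" rfl,
      pvU_eq d "is_available" "is_available: " rfl]
  have hhead : (if PySem.Dict.getD d "page_type" "" ≠ "" ∧ PySem.Dict.getD d "knowledge_source" "" ≠ "" then
        (" [knowledge_source: " ++ PySem.Dict.getD d "knowledge_source" "" ++ "]" : String) else "")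
      = pvSpaced (if PySem.Dict.getD d "page_type" "" ≠ "" ∧ PySem.Dict.getD d "knowledge_source" "" ≠ "" then
        ["[knowledge_source: " ++ PySem.Dict.getD d "knowledge_source" "" ++ "]"] else []) := by
    rw [pv_spaced_if]
    split
    · rw [← show (" " ++ "[knowledge_source: " : String) = " [knowledge_source: " from rfl]
      simp only [String.append_assoc]
    · rfl
  rw [hhead, ← pv_spaced_append, ← pv_spaced_append, ← pv_spaced_append, ← pv_spaced_append,
      ← pv_spaced_append, ← pv_spaced_append, ← pv_spaced_append, pv_slice1_spaced]

theorem pv_alt_eq_join (l : List (List (String × String))) :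
    format_knowledge_base_string_alt l = PySem.Str.join "\n\n###\n\n" (l.map pvSectionB) := by
  induction l with
  | nil =>
      rw [format_knowledge_base_string_alt, ← String.toList_inj, PySem.Str.toList_join]
      simp [PySem.Chars.join_nil]
  | cons r rest ih =>
      rw [format_knowledge_base_string_alt]
      cases rest with
      | nil => simp [← String.toList_inj, PySem.Str.toList_join, PySem.Chars.join_singleton]
      | cons q l =>
          simp only [reduceCtorEq, if_false, ih]
          rw [← String.toList_inj]
          conv_rhs => rw [PySem.Str.toList_join]
          simp only [List.map_cons]
          rw [PySem.Chars.join_cons_cons]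
          simp [PySem.Str.toList_join]

-- ===== VERDICT =====
theorem format_knowledge_base_string_spec : Claim_equal_format_knowledge_base_string := by
  intro final_results _
  unfold Spec_format_knowledge_base_string
  have hA : format_knowledge_base_string final_results
      = PySem.Str.join "\n\n###\n\n" (final_results.foldl (fun acc r => acc ++ [pvSectionA r]) []) := rfl
  rw [hA, pv_foldl_append_map pvSectionA final_results []]
  simp only [List.nil_append]
  rw [pv_alt_eq_join]
  exact congrArg (PySem.Str.join "\n\n###\n\n") (List.map_congr_left (fun r _ => pv_section_eq r))
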